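-- pv_equiv track=rewrite | github.com/brown-ccv/osu-benchmarks | benchmark.py | min_nodes
-- ===== SOURCE A (Python) =====
-- def min_nodes(two_d_dict, idlenode):
-- 	index1 = -1
-- 	index2 = -1
-- 	val = 1
--
-- 	# node lists are in alphanumerical order
-- 	for i in range(len(idlenode)):
-- 		for j in range(i+1, len(idlenode)):
-- 			# first check if the entry exists or not
-- 			if ((idlenode[i] not in two_d_dict) or (idlenode[j] not in two_d_dict[idlenode[i]])):
-- 				return (idlenode[i], idlenode[j])
-- 			elif (two_d_dict[idlenode[i]][idlenode[j]] < val):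
-- 				index1 = idlenode[i]
-- 				index2 = idlenode[j]
-- 				val = two_d_dict[idlenode[i]][idlenode[j]]
-- 	return (index1, index2)
-- ===== SOURCE B (Python) =====
-- def min_nodes(two_d_dict, idlenode):
--     def pairs():
--         # the row-major stream of pairs (idlenode[i], idlenode[j]), i < j
--         n = len(idlenode)
--         for i in range(n):
--             for j in range(i + 1, n):
--                 yield (idlenode[i], idlenode[j])
--     # pass 1: first pair with a missing entry, in row-major order
--     for a, b in pairs():
--         if a not in two_d_dict or b not in two_d_dict[a]:
--             return (a, b)
--     # pass 2: earliest pair whose value is strictly below the running minimum (init 1)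
--     best1, best2, best_val = -1, -1, 1
--     for a, b in pairs():
--         v = two_d_dict[a][b]
--         if v < best_val:
--             best1, best2, best_val = a, b, v
--     return (best1, best2)
-- ===== Notes on version B (the rewrite author's own statement) =====
-- stated objective: simpler
-- what changed: Replaced A's single interleaved nested loop (early return for a missing entry mixed with running-minimum bookkeeping) by two independent passes over the row-major pair stream: pass 1 returns the first pair with a missing dict entry, pass 2 does a plain minimum scan.
import Mathlib
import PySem

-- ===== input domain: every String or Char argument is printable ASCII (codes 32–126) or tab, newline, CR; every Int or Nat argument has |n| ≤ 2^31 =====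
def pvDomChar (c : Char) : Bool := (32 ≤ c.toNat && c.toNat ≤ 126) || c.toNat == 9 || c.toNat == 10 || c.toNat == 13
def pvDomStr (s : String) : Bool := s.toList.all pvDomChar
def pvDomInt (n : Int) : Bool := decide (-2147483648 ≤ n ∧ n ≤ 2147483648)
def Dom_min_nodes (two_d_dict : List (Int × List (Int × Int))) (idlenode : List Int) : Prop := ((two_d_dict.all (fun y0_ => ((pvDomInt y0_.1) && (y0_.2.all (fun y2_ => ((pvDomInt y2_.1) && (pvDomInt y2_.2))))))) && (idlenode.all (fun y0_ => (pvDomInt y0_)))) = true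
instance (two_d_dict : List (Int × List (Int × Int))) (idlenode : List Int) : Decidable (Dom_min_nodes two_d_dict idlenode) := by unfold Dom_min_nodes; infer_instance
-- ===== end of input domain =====

-- B replaces A's single interleaved nested loop by two independent passes over the
-- row-major pair list (find first missing entry, then a plain minimum scan): simpler decomposition, same cost.


-- dict lookup = first match in the association list ('k in d' / 'd[k]')
def pvLookup {ν : Type} (d : List (Int × ν)) (k : Int) : Option ν :=
  (d.find? (fun p => p.1 == k)).map (·.2)

-- ===== PORT A =====
-- A's nested 'for i / for j' loops with early return, as nested folds over a Sum:
-- Sum.inl p = the function has returned (idlenode[i], idlenode[j]); Sum.inr (index1, index2, val) = loop state.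
-- indices i, j come from range(len(idlenode)) so idlenode[i] / idlenode[j] never raise; pyGetD is exact there.
def min_nodes (two_d_dict : List (Int × List (Int × Int))) (idlenode : List Int) : Int × Int :=
  let n : Int := (idlenode.length : Int)
  let r :=
    (PySem.List.pyRange 0 n 1).foldl (fun acc i =>
      (PySem.List.pyRange (i + 1) n 1).foldl (fun acc2 j =>
        match acc2 with
        | Sum.inl p => Sum.inl p
        | Sum.inr st =>
          let a := PySem.List.pyGetD idlenode i 0
          let b := PySem.List.pyGetD idlenode j 0
          match pvLookup two_d_dict a with
          | none => Sum.inl (a, b)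
          | some row =>
            match pvLookup row b with
            | none => Sum.inl (a, b)
            | some w => if w < st.2.2 then Sum.inr (a, b, w) else Sum.inr st) acc)
      (Sum.inr (-1, -1, 1) : (Int × Int) ⊕ (Int × Int × Int))
  match r with
  | Sum.inl p => p
  | Sum.inr st => (st.1, st.2.1)

-- ===== PORT B =====
-- the row-major list of pairs (idlenode[i], idlenode[j]), i < j (indices from range(len) are in range)
def pvPairs (idlenode : List Int) : List (Int × Int) :=
  (PySem.List.pyRange 0 (idlenode.length : Int) 1).flatMap (fun i =>
    (PySem.List.pyRange (i + 1) (idlenode.length : Int) 1).map (fun j =>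
      (PySem.List.pyGetD idlenode i 0, PySem.List.pyGetD idlenode j 0)))

-- pass 1: first pair with a missing dict entry
def pvFindMissing (two_d_dict : List (Int × List (Int × Int))) : List (Int × Int) → Option (Int × Int)
  | [] => none
  | (a, b) :: rest =>
    match pvLookup two_d_dict a with
    | none => some (a, b)
    | some row =>
      match pvLookup row b with
      | none => some (a, b)
      | some _ => pvFindMissing two_d_dict rest

-- pass 2 step: plain minimum scan (runs only when pass 1 found no missing entry,
-- so both lookups succeed and the .getD defaults are never used)
def pvMinStep (two_d_dict : List (Int × List (Int × Int))) (st : Int × Int × Int) (ab : Int × Int) : Int × Int × Int :=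
  let v := (pvLookup ((pvLookup two_d_dict ab.1).getD []) ab.2).getD 0
  if v < st.2.2 then (ab.1, ab.2, v) else st

def min_nodes_alt (two_d_dict : List (Int × List (Int × Int))) (idlenode : List Int) : Int × Int :=
  let pairs := pvPairs idlenode
  match pvFindMissing two_d_dict pairs with
  | some p => p
  | none =>
    let st := pairs.foldl (pvMinStep two_d_dict) (-1, -1, 1)
    (st.1, st.2.1)

-- ===== PRECONDITION & SPEC =====
def Spec_min_nodes (two_d_dict : List (Int × List (Int × Int))) (idlenode : List Int) (out : Int × Int) : Prop := out = min_nodes_alt two_d_dict idlenode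
instance (two_d_dict : List (Int × List (Int × Int))) (idlenode : List Int) (out : Int × Int) : Decidable (Spec_min_nodes two_d_dict idlenode out) := by unfold Spec_min_nodes; infer_instance

-- ===== CLAIM (what is proved, stated in full; the proofs are below) =====
def Claim_equal_min_nodes : Prop := ∀ (two_d_dict : List (Int × List (Int × Int))) (idlenode : List Int), Dom_min_nodes two_d_dict idlenode → Spec_min_nodes two_d_dict idlenode (min_nodes two_d_dict idlenode)

-- ===== LEMMAS AND PROOFS =====

-- A's loop body on an abstract value pair (what the nested folds of min_nodes apply to each (a, b))
def pvStepA (two_d_dict : List (Int × List (Int × Int))) (acc : (Int × Int) ⊕ (Int × Int × Int)) (ab : Int × Int) : (Int × Int) ⊕ (Int × Int × Int) :=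
  match acc with
  | Sum.inl p => Sum.inl p
  | Sum.inr st =>
    match pvLookup two_d_dict ab.1 with
    | none => Sum.inl ab
    | some row =>
      match pvLookup row ab.2 with
      | none => Sum.inl ab
      | some w => if w < st.2.2 then Sum.inr (ab.1, ab.2, w) else Sum.inr st

-- A's nested folds are one fold of pvStepA over the row-major pair list
theorem min_nodes_eq_foldl (two_d_dict : List (Int × List (Int × Int))) (idlenode : List Int) :
    min_nodes two_d_dict idlenode =
      match (pvPairs idlenode).foldl (pvStepA two_d_dict) (Sum.inr (-1, -1, 1)) with
      | Sum.inl p => p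
      | Sum.inr st => (st.1, st.2.1) := by
  unfold min_nodes pvPairs pvStepA
  simp only [List.foldl_flatMap, List.foldl_map]

-- once the loop has returned, the rest of the fold is inert
theorem foldl_stepA_inl (two_d_dict : List (Int × List (Int × Int))) (ps : List (Int × Int)) (p : Int × Int) :
    ps.foldl (pvStepA two_d_dict) (Sum.inl p) = Sum.inl p := by
  induction ps with
  | nil => rfl
  | cons hd tl ih => simpa [pvStepA] using ih

-- if pass 1 finds a missing pair, A's fold returns it, from any state
theorem foldl_stepA_of_missing (two_d_dict : List (Int × List (Int × Int))) (ps : List (Int × Int)) (p : Int × Int)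
    (h : pvFindMissing two_d_dict ps = some p) (st : Int × Int × Int) :
    ps.foldl (pvStepA two_d_dict) (Sum.inr st) = Sum.inl p := by
  induction ps generalizing st with
  | nil => simp [pvFindMissing] at h
  | cons hd tl ih =>
    obtain ⟨a, b⟩ := hd
    simp only [pvFindMissing] at h
    simp only [List.foldl_cons, pvStepA]
    cases h1 : pvLookup two_d_dict a with
    | none =>
      simp [h1] at h ⊢
      subst h
      exact foldl_stepA_inl ..
    | some row =>
      cases h2 : pvLookup row b with
      | none =>
        simp [h1, h2] at h ⊢
        subst h
        exact foldl_stepA_inl ..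
      | some w =>
        simp [h1, h2] at h ⊢
        split <;> exact ih h _

-- if pass 1 finds nothing missing, A's fold is exactly the minimum scan of pass 2
theorem foldl_stepA_of_none (two_d_dict : List (Int × List (Int × Int))) (ps : List (Int × Int))
    (h : pvFindMissing two_d_dict ps = none) (st : Int × Int × Int) :
    ps.foldl (pvStepA two_d_dict) (Sum.inr st) = Sum.inr (ps.foldl (pvMinStep two_d_dict) st) := by
  induction ps generalizing st with
  | nil => rfl
  | cons hd tl ih =>
    obtain ⟨a, b⟩ := hd
    simp only [pvFindMissing] at h
    cases h1 : pvLookup two_d_dict a with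
    | none => simp [h1] at h
    | some row =>
      cases h2 : pvLookup row b with
      | none => simp [h1, h2] at h
      | some w =>
        simp only [h1, h2] at h
        simp only [List.foldl_cons, pvStepA, pvMinStep, h1, h2, Option.getD_some]
        split <;> exact ih h _

-- ===== VERDICT (by name: the statement is the Claim_ definition above) =====
theorem min_nodes_spec : Claim_equal_min_nodes := by
  intro two_d_dict idlenode _
  unfold Spec_min_nodes min_nodes_alt
  rw [min_nodes_eq_foldl]
  cases h : pvFindMissing two_d_dict (pvPairs idlenode) with
  | some p => rw [foldl_stepA_of_missing two_d_dict _ p h]; simp [h]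
  | none => rw [foldl_stepA_of_none two_d_dict _ h]; simp [h]
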